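-- pv_equiv track=rewrite | github.com/jramaswami/Binary_Search_Python | reverse_words_sequel.py | solve
-- ===== SOURCE A (Python) =====
-- from collections import namedtuple
--
-- Word = namedtuple('Word', ['start', 'end'])
--
-- def solve(sentence, delimiters):
--     # No constraints given.
--     # How many delimiters?
--     # Are delimiters single characters?
--
--     def word_to_string(word):
--         return sentence[word.start:word.end+1]
--
--     # Separate the words and the delimeters. For the words, just
--     # keep track of the indices.
--     just_words = []
--     curr = None
--     for i, c in enumerate(sentence):
--         if c in delimiters:
--             if curr is not None:
--                 just_words.append(curr)
--             curr = None
--         else: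
--             if curr is None:
--                 curr = Word(i, i)
--             else:
--                 curr = Word(curr.start, i)
--
--     # Don't forget the last word.
--     if curr is not None:
--         just_words.append(curr)
--
--     # Now do the same thing but when you would have appended a word to
--     # just_words, instead append the last item still in just words to
--     # the new sentence.
--     new_sentence = []
--     curr = None
--     for i, c in enumerate(sentence):
--         if c in delimiters:
--             if curr is not None:
--                 new_sentence.append(word_to_string(just_words.pop()))
--             new_sentence.append(c)
--             curr = None
--         else:
--             if curr is None:
--                 curr = Word(i, i)
--             else:
--                 curr = Word(curr.start, i)
--
--     # Don't forget the last word.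
--     if curr is not None:
--         new_sentence.append(word_to_string(just_words.pop()))
--
--     return "".join(new_sentence)
-- ===== SOURCE B (Python) =====
-- def solve(sentence, delimiters):
--     # One tokenizing pass: collect words and a token stream (delimiter chars,
--     # None as word placeholder), then reverse the words and replay the tokens.
--     words = []
--     tokens = []
--     buf = []
--     for c in sentence:
--         if c in delimiters:
--             if buf:
--                 words.append(''.join(buf))
--                 tokens.append(None)
--                 buf = []
--             tokens.append(c)
--         else:
--             buf.append(c)
--     if buf:
--         words.append(''.join(buf))
--         tokens.append(None)
--     words.reverse()
--     it = iter(words)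
--     return ''.join(next(it) if t is None else t for t in tokens)
-- ===== Notes on version B (the rewrite author's own statement) =====
-- stated objective: simpler
-- what changed: One tokenizing pass builds the word list and a token stream (delimiter chars plus word placeholders), then the words are reversed and the tokens replayed, instead of A's two full scans with index-span namedtuples and stack pops from the span list.
import Mathlib
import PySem

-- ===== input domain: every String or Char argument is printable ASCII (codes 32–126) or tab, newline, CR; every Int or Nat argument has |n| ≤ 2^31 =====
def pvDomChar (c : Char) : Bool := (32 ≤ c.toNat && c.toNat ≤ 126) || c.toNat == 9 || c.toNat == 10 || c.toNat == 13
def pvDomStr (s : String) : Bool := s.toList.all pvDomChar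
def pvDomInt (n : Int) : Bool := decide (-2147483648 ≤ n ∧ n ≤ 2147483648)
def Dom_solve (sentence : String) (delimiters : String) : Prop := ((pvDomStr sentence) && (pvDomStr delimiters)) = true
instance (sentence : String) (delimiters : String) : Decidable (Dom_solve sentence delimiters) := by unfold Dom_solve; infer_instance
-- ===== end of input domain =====

-- B replaces A's index-span records plus a second rescan-with-stack-pops by one
-- tokenizing pass (word list + token stream) that is replayed with the words reversed
-- (objective: simpler).

-- ===== PORT A =====
-- first loop: `for i, c in enumerate(sentence)` with state (just_words, curr);
-- curr is the current word's (start, end) index span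
def solveLoop1 (delims : List Char) : Nat → List Char → List (Nat × Nat) → Option (Nat × Nat) → List (Nat × Nat) × Option (Nat × Nat)
  | _, [], jw, curr => (jw, curr)
  | i, c :: rest, jw, curr =>
    if delims.contains c then
      solveLoop1 delims (i+1) rest (match curr with | some w => jw ++ [w] | none => jw) none
    else
      solveLoop1 delims (i+1) rest jw (some (match curr with | none => (i, i) | some w => (w.1, i)))

-- "Don't forget the last word" after the first loop
def finishA1 (r : List (Nat × Nat) × Option (Nat × Nat)) : List (Nat × Nat) :=
  match r.2 with | some w => r.1 ++ [w] | none => r.1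

-- sentence[word.start:word.end+1]; exact: the spans fed to it satisfy 0 ≤ start ≤ end < len
def wordToString (cs : List Char) (w : Nat × Nat) : List Char :=
  (cs.drop w.1).take (w.2 + 1 - w.1)

-- second loop: same scan, but on finishing a word it pops just_words from the end;
-- the pop can never fail on a reachable state (the none branch mirrors that dead path)
def solveLoop2 (delims : List Char) (cs0 : List Char) : Nat → List Char → List (Nat × Nat) → List (List Char) → Option (Nat × Nat) → List (Nat × Nat) × List (List Char) × Option (Nat × Nat)
  | _, [], jw, out, curr => (jw, out, curr)
  | i, c :: rest, jw, out, curr =>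
    if delims.contains c then
      let (jw', out') :=
        match curr with
        | some _ =>
          (match jw.getLast? with
           | some w => (jw.dropLast, out ++ [wordToString cs0 w])
           | none => (jw, out))
        | none => (jw, out)
      solveLoop2 delims cs0 (i+1) rest jw' (out' ++ [[c]]) none
    else
      solveLoop2 delims cs0 (i+1) rest jw out (some (match curr with | none => (i, i) | some w => (w.1, i)))

-- "Don't forget the last word" after the second loop
def finishA2 (cs0 : List Char) (r : List (Nat × Nat) × List (List Char) × Option (Nat × Nat)) : List (List Char) :=
  match r.2.2 with
  | some _ =>
    (match r.1.getLast? with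
     | some w => r.2.1 ++ [wordToString cs0 w]
     | none => r.2.1)
  | none => r.2.1

def solve (sentence : String) (delimiters : String) : String :=
  let cs := sentence.toList
  let delims := delimiters.toList
  let just_words := finishA1 (solveLoop1 delims 0 cs [] none)
  let out := finishA2 cs (solveLoop2 delims cs 0 cs just_words [] none)
  String.ofList out.flatten

-- ===== PORT B =====
-- one pass: words, tokens (some c = delimiter char, none = word placeholder), char buffer
def altScan (delims : List Char) : List Char → List (List Char) → List (Option Char) → List Char → List (List Char) × List (Option Char) × List Char
  | [], ws, ts, buf => (ws, ts, buf)
  | c :: rest, ws, ts, buf =>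
    if delims.contains c then
      if buf.isEmpty then altScan delims rest ws (ts ++ [some c]) []
      else altScan delims rest (ws ++ [buf]) (ts ++ [none, some c]) []
    else altScan delims rest ws ts (buf ++ [c])

-- replay the tokens, drawing the next word for each placeholder (next(it); the
-- exhausted-iterator branch is unreachable: placeholders and words are produced in step)
def altRender : List (Option Char) → List (List Char) → List Char
  | [], _ => []
  | some c :: ts, ws => c :: altRender ts ws
  | none :: ts, w :: ws => w ++ altRender ts ws
  | none :: ts, [] => altRender ts []

def solve_alt (sentence : String) (delimiters : String) : String :=
  let delims := delimiters.toList
  let r := altScan delims sentence.toList [] [] []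
  let ws := if r.2.2.isEmpty then r.1 else r.1 ++ [r.2.2]
  let ts := if r.2.2.isEmpty then r.2.1 else r.2.1 ++ [none]
  String.ofList (altRender ts ws.reverse)

-- ===== PRECONDITION & SPEC =====
def Spec_solve (sentence : String) (delimiters : String) (out : String) : Prop := out = solve_alt sentence delimiters
instance (sentence : String) (delimiters : String) (out : String) : Decidable (Spec_solve sentence delimiters out) := by unfold Spec_solve; infer_instance

-- ===== CLAIM =====
def Claim_equal_solve : Prop := ∀ (sentence : String) (delimiters : String), Dom_solve sentence delimiters → Spec_solve sentence delimiters (solve sentence delimiters)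

-- ===== LEMMAS AND PROOFS =====

-- proof-only specs: the words and the token stream of the remaining text, given the buffer
def specW (d : List Char) : List Char → List Char → List (List Char)
  | [], buf => if buf.isEmpty then [] else [buf]
  | c :: rest, buf =>
    if d.contains c then (if buf.isEmpty then specW d rest [] else buf :: specW d rest [])
    else specW d rest (buf ++ [c])

def specT (d : List Char) : List Char → List Char → List (Option Char)
  | [], buf => if buf.isEmpty then [] else [none]
  | c :: rest, buf =>
    if d.contains c then (if buf.isEmpty then some c :: specT d rest [] else none :: some c :: specT d rest [])
    else specT d rest (buf ++ [c])

-- link between A's curr span and B's buffer at scan position i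
def RelAB (cs0 : List Char) (i : Nat) (curr : Option (Nat × Nat)) (buf : List Char) : Prop :=
  match curr with
  | none => buf = []
  | some (s, e) => e + 1 = i ∧ s ≤ e ∧ e < cs0.length ∧ buf = (cs0.drop s).take (i - s)

lemma RelAB_buf_ne (cs0 : List Char) (i : Nat) (s e : Nat) (buf : List Char)
    (h : RelAB cs0 i (some (s, e)) buf) : buf.isEmpty = false := by
  obtain ⟨h1, h2, h3, h4⟩ := h
  have hl : buf.length = min (i - s) (cs0.length - s) := by rw [h4]; simp
  have hp : 0 < buf.length := by rw [hl]; omega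
  cases buf with
  | nil => simp at hp
  | cons a l => rfl

lemma RelAB_word (cs0 : List Char) (i : Nat) (s e : Nat) (buf : List Char)
    (h : RelAB cs0 i (some (s, e)) buf) : wordToString cs0 (s, e) = buf := by
  obtain ⟨h1, h2, h3, h4⟩ := h
  simp [wordToString, h4]
  congr 1
  omega

lemma drop_cons_getElem (cs0 : List Char) (i : Nat) (c : Char) (rest : List Char)
    (h : cs0.drop i = c :: rest) : cs0[i]? = some c := by
  have h0 : (cs0.drop i)[0]? = cs0[i + 0]? := List.getElem?_drop
  rw [h] at h0
  simpa using h0.symm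

lemma drop_succ_of_cons (cs0 : List Char) (i : Nat) (c : Char) (rest : List Char)
    (h : cs0.drop i = c :: rest) : cs0.drop (i+1) = rest := by
  have h0 : (cs0.drop i).tail = cs0.drop (i + 1) := List.tail_drop
  rw [h] at h0
  simpa using h0.symm

lemma RelAB_step (cs0 : List Char) (i : Nat) (curr : Option (Nat × Nat)) (buf : List Char)
    (c : Char) (rest : List Char) (hd : cs0.drop i = c :: rest) (h : RelAB cs0 i curr buf) :
    RelAB cs0 (i+1) (some (match curr with | none => (i, i) | some w => (w.1, i)))
      (buf ++ [c]) := by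
  have hi : i < cs0.length := by
    by_contra hle
    have : cs0.drop i = [] := List.drop_eq_nil_of_le (by omega)
    simp [this] at hd
  have hget : cs0[i]? = some c := drop_cons_getElem cs0 i c rest hd
  cases curr with
  | none =>
    simp only [RelAB] at h
    subst h
    refine ⟨rfl, le_refl _, hi, ?_⟩
    have ht : (cs0.drop i).take 1 = [c] := by simp [hd]
    simpa using ht.symm
  | some w =>
    obtain ⟨s, e⟩ := w
    obtain ⟨h1, h2, h3, h4⟩ := h
    refine ⟨rfl, by omega, hi, ?_⟩
    have hsucc : (cs0.drop s).take (i - s + 1) = (cs0.drop s).take (i - s) ++ ((cs0.drop s)[i - s]?).toList :=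
      List.take_add_one
    have hg : (cs0.drop s)[i - s]? = some c := by
      have hx : (cs0.drop s)[i - s]? = cs0[s + (i - s)]? := List.getElem?_drop
      have hy : s + (i - s) = i := by omega
      rw [hx, hy, hget]
    have heq : (cs0.drop s).take (i - s + 1) = (cs0.drop s).take (i - s) ++ [c] := by
      rw [hsucc, hg]; rfl
    have hz : i + 1 - s = (i - s) + 1 := by omega
    rw [hz, heq, h4]

-- A's first pass computes (as strings) exactly specW
lemma loopA1_spec (d : List Char) (cs0 : List Char) :
    ∀ (rest : List Char) (i : Nat) (jw : List (Nat × Nat)) (curr : Option (Nat × Nat)) (buf : List Char),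
      cs0.drop i = rest → RelAB cs0 i curr buf →
      (finishA1 (solveLoop1 d i rest jw curr)).map (wordToString cs0)
        = jw.map (wordToString cs0) ++ specW d rest buf := by
  intro rest
  induction rest with
  | nil =>
    intro i jw curr buf hd hrel
    cases curr with
    | none =>
      simp only [RelAB] at hrel; subst hrel
      simp [solveLoop1, finishA1, specW]
    | some w =>
      obtain ⟨s, e⟩ := w
      have hne := RelAB_buf_ne cs0 i s e buf hrel
      have hw := RelAB_word cs0 i s e buf hrel
      simp [solveLoop1, finishA1, specW, hne, hw]
  | cons c rest' ih =>
    intro i jw curr buf hd hrel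
    have hd' := drop_succ_of_cons cs0 i c rest' hd
    by_cases hc : d.contains c
    · have hc' : c ∈ d := by simpa using hc
      cases curr with
      | none =>
        simp only [RelAB] at hrel; subst hrel
        simp only [solveLoop1, hc, if_true]
        rw [ih (i+1) jw none [] hd' (by simp [RelAB])]
        simp [specW, hc']
      | some w =>
        obtain ⟨s, e⟩ := w
        have hne := RelAB_buf_ne cs0 i s e buf hrel
        have hw := RelAB_word cs0 i s e buf hrel
        simp only [solveLoop1, hc, if_true]
        rw [ih (i+1) (jw ++ [(s, e)]) none [] hd' (by simp [RelAB])]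
        simp [specW, hc', hne, hw]
    · have hc' : c ∉ d := by simpa using hc
      cases curr with
      | none =>
        have hrel' : RelAB cs0 (i+1) (some (i, i)) (buf ++ [c]) := by
          simpa using RelAB_step cs0 i none buf c rest' hd hrel
        simp only [solveLoop1, hc, Bool.false_eq_true, if_false]
        rw [ih (i+1) jw (some (i, i)) (buf ++ [c]) hd' hrel']
        simp [specW, hc']
      | some w =>
        have hrel' : RelAB cs0 (i+1) (some (w.1, i)) (buf ++ [c]) := by
          simpa using RelAB_step cs0 i (some w) buf c rest' hd hrel
        simp only [solveLoop1, hc, Bool.false_eq_true, if_false]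
        rw [ih (i+1) jw (some (w.1, i)) (buf ++ [c]) hd' hrel']
        simp [specW, hc']

-- A's second pass renders specT against the reversed word stack
lemma loopA2_spec (d : List Char) (cs0 : List Char) :
    ∀ (rest : List Char) (i : Nat) (jw : List (Nat × Nat)) (out : List (List Char))
      (curr : Option (Nat × Nat)) (buf : List Char),
      cs0.drop i = rest → RelAB cs0 i curr buf →
      (finishA2 cs0 (solveLoop2 d cs0 i rest jw out curr)).flatten
        = out.flatten ++ altRender (specT d rest buf) ((jw.map (wordToString cs0)).reverse) := by
  intro rest
  induction rest with
  | nil =>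
    intro i jw out curr buf hd hrel
    cases curr with
    | none =>
      simp only [RelAB] at hrel; subst hrel
      simp [solveLoop2, finishA2, specT, altRender]
    | some w =>
      obtain ⟨s, e⟩ := w
      have hne := RelAB_buf_ne cs0 i s e buf hrel
      have hw := RelAB_word cs0 i s e buf hrel
      rcases jw.eq_nil_or_concat with h | ⟨ys, y, h⟩
      · subst h; simp [solveLoop2, finishA2, specT, altRender, hne]
      · subst h
        simp [solveLoop2, finishA2, specT, altRender, hne]
  | cons c rest' ih =>
    intro i jw out curr buf hd hrel
    have hd' := drop_succ_of_cons cs0 i c rest' hd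
    by_cases hc : d.contains c
    · have hc' : c ∈ d := by simpa using hc
      cases curr with
      | none =>
        simp only [RelAB] at hrel; subst hrel
        simp only [solveLoop2, hc, if_true]
        rw [ih (i+1) jw (out ++ [[c]]) none [] hd' (by simp [RelAB])]
        simp [specT, hc', altRender]
      | some w =>
        obtain ⟨s, e⟩ := w
        have hne := RelAB_buf_ne cs0 i s e buf hrel
        rcases jw.eq_nil_or_concat with h | ⟨ys, y, h⟩
        · subst h
          simp only [solveLoop2, hc, if_true, List.getLast?_nil]
          rw [ih (i+1) [] (out ++ [[c]]) none [] hd' (by simp [RelAB])]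
          simp [specT, hc', hne, altRender]
        · subst h
          simp only [List.concat_eq_append, solveLoop2, hc, if_true, List.getLast?_concat,
            List.dropLast_concat]
          rw [ih (i+1) ys ((out ++ [wordToString cs0 y]) ++ [[c]]) none [] hd' (by simp [RelAB])]
          simp [specT, hc', hne, altRender]
    · have hc' : c ∉ d := by simpa using hc
      cases curr with
      | none =>
        have hrel' : RelAB cs0 (i+1) (some (i, i)) (buf ++ [c]) := by
          simpa using RelAB_step cs0 i none buf c rest' hd hrel
        simp only [solveLoop2, hc, Bool.false_eq_true, if_false]
        rw [ih (i+1) jw out (some (i, i)) (buf ++ [c]) hd' hrel']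
        simp [specT, hc']
      | some w =>
        have hrel' : RelAB cs0 (i+1) (some (w.1, i)) (buf ++ [c]) := by
          simpa using RelAB_step cs0 i (some w) buf c rest' hd hrel
        simp only [solveLoop2, hc, Bool.false_eq_true, if_false]
        rw [ih (i+1) jw out (some (w.1, i)) (buf ++ [c]) hd' hrel']
        simp [specT, hc']

-- B's scan (after the final flush) computes exactly (specW, specT)
lemma altScan_spec (d : List Char) :
    ∀ (cs : List Char) (ws : List (List Char)) (ts : List (Option Char)) (buf : List Char),
      ((if (altScan d cs ws ts buf).2.2.isEmpty then (altScan d cs ws ts buf).1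
        else (altScan d cs ws ts buf).1 ++ [(altScan d cs ws ts buf).2.2]) = ws ++ specW d cs buf)
      ∧ ((if (altScan d cs ws ts buf).2.2.isEmpty then (altScan d cs ws ts buf).2.1
        else (altScan d cs ws ts buf).2.1 ++ [none]) = ts ++ specT d cs buf) := by
  intro cs
  induction cs with
  | nil =>
    intro ws ts buf
    by_cases hb : buf.isEmpty
    · have hbe : buf = [] := by cases buf <;> simp_all
      subst hbe
      simp [altScan, specW, specT]
    · simp [altScan, specW, specT, hb]
  | cons c rest ih =>
    intro ws ts buf
    by_cases hc : d.contains c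
    · have hc' : c ∈ d := by simpa using hc
      by_cases hb : buf.isEmpty
      · have hbe : buf = [] := by cases buf <;> simp_all
        subst hbe
        simp only [altScan, hc, if_true, List.isEmpty_nil]
        refine ⟨?_, ?_⟩
        · rw [(ih ws (ts ++ [some c]) []).1]; simp [specW, hc']
        · rw [(ih ws (ts ++ [some c]) []).2]; simp [specT, hc']
      · have hb' : buf.isEmpty = false := by simpa using hb
        simp only [altScan, hc, if_true, hb', Bool.false_eq_true, if_false]
        refine ⟨?_, ?_⟩
        · rw [(ih (ws ++ [buf]) (ts ++ [none, some c]) []).1]; simp [specW, hc', hb']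
        · rw [(ih (ws ++ [buf]) (ts ++ [none, some c]) []).2]; simp [specT, hc', hb']
    · have hc' : c ∉ d := by simpa using hc
      simp only [altScan, hc, Bool.false_eq_true, if_false]
      refine ⟨?_, ?_⟩
      · rw [(ih ws ts (buf ++ [c])).1]; simp [specW, hc']
      · rw [(ih ws ts (buf ++ [c])).2]; simp [specT, hc']

-- ===== VERDICT =====
theorem solve_spec : Claim_equal_solve := by
  unfold Claim_equal_solve
  intro sentence delimiters _
  unfold Spec_solve solve solve_alt
  have hW := loopA1_spec delimiters.toList sentence.toList sentence.toList 0 [] none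
    [] (by simp) (by simp [RelAB])
  have hA := loopA2_spec delimiters.toList sentence.toList sentence.toList 0
    (finishA1 (solveLoop1 delimiters.toList 0 sentence.toList [] none)) [] none []
    (by simp) (by simp [RelAB])
  have hB := altScan_spec delimiters.toList sentence.toList [] [] []
  simp only [List.nil_append, List.map_nil] at hW hA hB
  simp only [List.flatten_nil, List.nil_append] at hA
  rw [hW] at hA
  simp only [List.isEmpty_iff] at hB
  simp [hA, hB.1, hB.2]
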